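-- pv_equiv track=rewrite | github.com/DerekEarnhart/SafeUSI | attached_assets/true_wsm_intelligence_1759254814720.py | _extract_problem_item
-- ===== SOURCE A (Python) =====
-- def _extract_problem_item(text: str) -> str:
--     """Extract problematic item from text"""
--     words = text.lower().split()
--
--     # Look for "X broke down" or "X is broken" patterns
--     for i, word in enumerate(words):
--         if word in ['broke', 'broken', 'problem'] and i > 0:
--             return words[i - 1]
--
--     # Common problem items
--     problem_items = ['car', 'computer', 'phone', 'laptop', 'bike', 'washing machine', 'dishwasher']
--     for word in words:
--         if word in problem_items:
--             return word
--
--     return "thing"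
-- ===== SOURCE B (Python) =====
-- def _extract_problem_item(text: str) -> str:
--     """Extract problematic item from text (single pass)."""
--     triggers = ('broke', 'broken', 'problem')
--     problem_items = ('car', 'computer', 'phone', 'laptop', 'bike', 'washing machine', 'dishwasher')
--     prev = None
--     fallback = None
--     for w in text.lower().split():
--         if prev is not None:
--             if w in triggers:
--                 return prev
--         if fallback is None and w in problem_items:
--             fallback = w
--         prev = w
--     return fallback if fallback is not None else "thing"
-- ===== Notes on version B (the rewrite author's own statement) =====
-- stated objective: alternative
-- what changed: Replaced A's two sequential scans (enumerate-based trigger scan with index arithmetic, then a second full scan for problem items) by one pass that carries the previous word and the first problem-item fallback, returning the previous word immediately on a trigger and the fallback (or 'thing') at the end.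
import Mathlib
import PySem

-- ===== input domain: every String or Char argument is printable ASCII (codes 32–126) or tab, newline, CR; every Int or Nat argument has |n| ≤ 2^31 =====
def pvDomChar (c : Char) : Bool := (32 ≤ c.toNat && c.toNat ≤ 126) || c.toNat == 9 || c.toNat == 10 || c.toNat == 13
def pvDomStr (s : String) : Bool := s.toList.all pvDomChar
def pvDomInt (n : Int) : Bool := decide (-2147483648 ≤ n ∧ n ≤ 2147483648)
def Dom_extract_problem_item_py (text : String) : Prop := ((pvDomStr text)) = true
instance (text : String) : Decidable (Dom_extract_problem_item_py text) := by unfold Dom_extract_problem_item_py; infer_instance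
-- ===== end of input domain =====

-- B replaces A's two sequential scans by one pass carrying the previous word and a fallback; alternative decomposition, same cost.

-- ===== PORT A =====
def pvTriggers : List String := ["broke", "broken", "problem"]
def pvItems : List String :=
  ["car", "computer", "phone", "laptop", "bike", "washing machine", "dishwasher"]

-- first loop of A: 'for i, word in enumerate(words): if word in [...] and i > 0: return words[i-1]'
-- (Python's words[i-1] never raises here since i > 0; pyGetD's default "" is never used)
def pvLoopA1 (words : List String) : List (Int × String) → Option String
  | [] => none
  | (i, w) :: rest =>
    if w ∈ pvTriggers ∧ i > 0 then some (PySem.List.pyGetD words (i - 1) "")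
    else pvLoopA1 words rest

-- second loop of A: 'for word in words: if word in problem_items: return word'
def pvLoopA2 : List String → Option String
  | [] => none
  | w :: rest => if w ∈ pvItems then some w else pvLoopA2 rest

def extract_problem_item_py (text : String) : String :=
  let words := PySem.Str.split₀ (PySem.Str.lower text)
  match pvLoopA1 words (PySem.List.enumerate words) with
  | some r => r
  | none =>
    match pvLoopA2 words with
    | some w => w
    | none => "thing"

-- ===== PORT B =====
-- B's single loop: carries prev (previous word) and fallback (first problem item seen)
def pvScanB : List String → Option String → Option String → String
  | [], _, fb => fb.getD "thing"
  | w :: ws, prev, fb =>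
    match prev with
    | some p =>
      if w ∈ pvTriggers then p
      else pvScanB ws (some w) (if fb = none ∧ w ∈ pvItems then some w else fb)
    | none => pvScanB ws (some w) (if fb = none ∧ w ∈ pvItems then some w else fb)

def extract_problem_item_py_alt (text : String) : String :=
  pvScanB (PySem.Str.split₀ (PySem.Str.lower text)) none none

-- ===== PRECONDITION & SPEC =====
def Spec_extract_problem_item_py (text : String) (out : String) : Prop := out = extract_problem_item_py_alt text
instance (text : String) (out : String) : Decidable (Spec_extract_problem_item_py text out) := by unfold Spec_extract_problem_item_py; infer_instance

-- ===== CLAIM (what is proved, stated in full; the proofs are below) =====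
def Claim_equal_extract_problem_item_py : Prop := ∀ (text : String), Dom_extract_problem_item_py text → Spec_extract_problem_item_py text (extract_problem_item_py text)

-- ===== LEMMAS AND PROOFS =====

-- prev-carrying characterisation of A's first loop
def pvH : Option String → List String → Option String
  | _, [] => none
  | prev, w :: ws =>
    if w ∈ pvTriggers ∧ prev.isSome then prev else pvH (some w) ws

lemma pvLoopA1_eq_pvH (rest pre : List String) :
    pvLoopA1 (pre ++ rest) (PySem.List.enumerate rest pre.length) =
      pvH pre.getLast? rest := by
  induction rest generalizing pre with
  | nil => simp [pvLoopA1, pvH]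
  | cons w ws ih =>
    rw [PySem.List.enumerate_cons]
    by_cases ht : w ∈ pvTriggers
    · cases pre with
      | nil =>
        simp only [pvLoopA1, pvH, List.length_nil]
        have h0 := ih [w]
        simp only [List.singleton_append, List.length_cons, List.length_nil,
          List.getLast?_singleton, Nat.zero_add, Nat.cast_one] at h0
        simp only [Nat.cast_zero, gt_iff_lt, lt_self_iff_false, and_false, if_false,
          List.nil_append, List.getLast?_nil, Option.isSome_none,
          Bool.false_eq_true]
        exact h0
      | cons p ps =>
        have hpos : ((p :: ps).length : Int) > 0 := by
          simp
        simp only [pvLoopA1, pvH, if_pos (And.intro ht hpos)]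
        have hidx : ((p :: ps).length : Int) - 1 = ((p :: ps).length - 1 : Nat) := by
          simp
        rw [hidx, PySem.List.pyGetD_natCast]
        have hlt : (p :: ps).length - 1 < (p :: ps).length := by simp
        rw [List.getD_eq_getElem?_getD, List.getElem?_append_left (by omega),
          List.getElem?_eq_getElem hlt]
        simp [ht, List.getLast?_eq_getElem?]
        rfl
    · have hstep : pvLoopA1 (pre ++ w :: ws) ((↑pre.length, w) ::
          PySem.List.enumerate ws (↑pre.length + 1)) =
          pvLoopA1 (pre ++ w :: ws) (PySem.List.enumerate ws (↑pre.length + 1)) := by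
        simp [pvLoopA1, ht]
      rw [hstep]
      have := ih (pre ++ [w])
      simp only [List.append_assoc, List.singleton_append, List.length_append,
        List.length_cons, List.length_nil] at this
      rw [show ((pre.length : Int) + 1) = ((pre.length + 0 + 1 : Nat) : Int) by push_cast; ring]
      rw [this]
      simp [pvH, ht]

-- B's fallback accumulation equals 'fb or else A's second loop'
lemma pvScanB_char (ws : List String) (prev fb : Option String) :
    pvScanB ws prev fb =
      match pvH prev ws with
      | some r => r
      | none =>
        match fb with
        | some f => f
        | none => (pvLoopA2 ws).getD "thing" := by
  induction ws generalizing prev fb with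
  | nil => cases fb <;> simp [pvScanB, pvH, pvLoopA2, Option.getD]
  | cons w ws ih =>
    by_cases ht : w ∈ pvTriggers
    · cases prev with
      | some p => simp [pvScanB, pvH, ht]
      | none =>
        simp only [pvScanB, pvH, ht, Option.isSome_none, Bool.false_eq_true, and_false,
          if_false, ih]
        cases fb with
        | some f => simp
        | none =>
          have hni : w ∉ pvItems := by fin_cases ht <;> decide
          simp [pvLoopA2, hni]
    · have hbranch : pvScanB (w :: ws) prev fb =
          pvScanB ws (some w) (if fb = none ∧ w ∈ pvItems then some w else fb) := by
        cases prev <;> simp [pvScanB, ht]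
      have hH : pvH prev (w :: ws) = pvH (some w) ws := by
        cases prev <;> simp [pvH, ht]
      rw [hbranch, ih, hH]
      cases fb with
      | some f => simp
      | none =>
        by_cases hi : w ∈ pvItems
        · simp [pvLoopA2, hi]
        · simp [pvLoopA2, hi]

-- ===== VERDICT (by name: the statement is the Claim_ definition above) =====
theorem extract_problem_item_py_spec : Claim_equal_extract_problem_item_py := by
  intro text _
  unfold Spec_extract_problem_item_py extract_problem_item_py extract_problem_item_py_alt
  set words := PySem.Str.split₀ (PySem.Str.lower text) with hw
  have h1 := pvLoopA1_eq_pvH words []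
  simp only [List.nil_append, List.length_nil, Nat.cast_zero, List.getLast?_nil] at h1
  have h2 := pvScanB_char words none none
  rw [h2, ← h1]
  cases hA : pvLoopA1 words (PySem.List.enumerate words) with
  | some r => simp [hA]
  | none =>
    simp only [hA]
    cases pvLoopA2 words <;> simp [Option.getD]
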